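-- pv_equiv track=rewrite | github.com/Xotrab/modelowanieBiznesowe | backend/model.py | get_parallel_events_plus
-- ===== SOURCE A (Python) =====
-- def are_short_loop(short_loops, pred, curr):
--   is_curr_key_pred_value = pred in short_loops and short_loops[pred] == curr
--   is_pred_key_curr_value = curr in short_loops and short_loops[curr] == pred
--
--   return is_curr_key_pred_value or is_pred_key_curr_value
--
-- def get_parallel_events_plus(successions, traces, short_loops):
--   parallel_events = []
--   for key in successions:
--     for successor_key in successions[key]:
--       if successor_key in successions and key in successions[successor_key] and not are_short_loop(short_loops, key, successor_key):
--         for key_set in parallel_events: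
--           if key in key_set:
--             key_set.add(successor_key)
--         else:
--           parallel_events.append(set([key, successor_key]))
--
--   filtered_parallel_events = []
--   for parallels in parallel_events:
--     if(parallels not in filtered_parallel_events):
--       filtered_parallel_events.append(parallels)
--
--   return filtered_parallel_events
-- ===== SOURCE B (Python) =====
-- def get_parallel_events_plus(successions, traces, short_loops):
--   # Every mutually-succeeding, non-short-loop (key, successor) pair seeds one
--   # cluster, which then absorbs the successor of every later pair whose key it
--   # already contains; finally duplicate clusters are dropped via a seen-set.
--   pairs = [(k, s)
--            for k, succs in successions.items()
--            for s in succs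
--            if k in successions.get(s, ()) and not (
--                short_loops.get(k) == s or short_loops.get(s) == k)]
--   clusters = []
--   for i, (k, s) in enumerate(pairs):
--     cluster = {k, s}
--     for k2, s2 in pairs[i + 1:]:
--       if k2 in cluster:
--         cluster.add(s2)
--     clusters.append(cluster)
--   seen = set()
--   result = []
--   for c in clusters:
--     f = frozenset(c)
--     if f not in seen:
--       seen.add(f)
--       result.append(c)
--   return result
-- ===== Notes on version B (the rewrite author's own statement) =====
-- stated objective: alternative
-- what changed: B first extracts the list of qualifying mutually-succeeding non-short-loop pairs, then builds each pair's cluster directly as a forward closure over the later pairs (instead of A's interleaved update of all accumulated sets while scanning succession edges), and deduplicates in one pass with a seen-set of frozensets instead of quadratic list membership.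
import Mathlib
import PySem

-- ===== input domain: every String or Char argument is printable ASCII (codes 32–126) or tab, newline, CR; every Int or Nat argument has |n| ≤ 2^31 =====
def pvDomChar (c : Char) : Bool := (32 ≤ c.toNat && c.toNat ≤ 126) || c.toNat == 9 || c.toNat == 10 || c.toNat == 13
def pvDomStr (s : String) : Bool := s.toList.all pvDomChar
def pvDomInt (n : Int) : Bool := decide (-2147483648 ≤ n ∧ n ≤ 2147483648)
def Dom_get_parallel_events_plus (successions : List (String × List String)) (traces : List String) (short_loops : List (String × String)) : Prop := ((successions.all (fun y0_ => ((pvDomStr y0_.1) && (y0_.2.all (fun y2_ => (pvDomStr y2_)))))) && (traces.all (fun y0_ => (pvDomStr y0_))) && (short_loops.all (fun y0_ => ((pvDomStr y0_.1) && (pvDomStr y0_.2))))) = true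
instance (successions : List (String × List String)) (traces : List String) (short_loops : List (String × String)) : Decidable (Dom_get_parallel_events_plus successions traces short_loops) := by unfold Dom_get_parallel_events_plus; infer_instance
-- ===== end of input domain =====

-- B extracts the qualifying pairs first and builds each cluster as a forward
-- closure over the later pairs, deduplicating with a seen-set; objective:
-- alternative algorithm of similar cost.

-- ===== PORT A =====

def pvAreShortLoop (sl : PySem.Dict String String) (pred curr : String) : Bool :=
  let isCurrKeyPredValue := sl.contains pred && (((sl.get? pred).getD "") == curr)
  let isPredKeyCurrValue := sl.contains curr && (((sl.get? curr).getD "") == pred)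
  isCurrKeyPredValue || isPredKeyCurrValue

-- the if-condition of A's inner loop
def pvHitA (sd : PySem.Dict String (List String)) (sl : PySem.Dict String String)
    (key succ : String) : Bool :=
  sd.contains succ && (((sd.get? succ).getD []).contains key) && !(pvAreShortLoop sl key succ)

-- A's body for one qualifying (key, successor_key): the inner 'for key_set …' loop,
-- then (for-else with no break: always) the append of {key, successor_key}
def pvStepA (pe : List (List String)) (key succ : String) : List (List String) :=
  (pe.map (fun ks => if ks.contains key then PySem.Set.add ks succ else ks))
    ++ [PySem.Set.ofList [key, succ]]

def get_parallel_events_plus (successions : List (String × List String)) (traces : List String) (short_loops : List (String × String)) : List (List String) :=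
  let sd : PySem.Dict String (List String) := PySem.Dict.ofList successions
  let sl : PySem.Dict String String := PySem.Dict.ofList short_loops
  let pe : List (List String) := sd.items.foldl (fun pe kv =>
    kv.2.foldl (fun pe succ =>
      if pvHitA sd sl kv.1 succ then pvStepA pe kv.1 succ else pe) pe) []
  pe.foldl (fun filtered p =>
    if filtered.any (fun q => PySem.Set.equal q p) then filtered else filtered ++ [p]) []

-- ===== PORT B =====

-- B's pair condition (written with dict .get in Source B)
def pvHitB (sd : PySem.Dict String (List String)) (sl : PySem.Dict String String)
    (key succ : String) : Bool :=
  (((sd.get? succ).getD []).contains key)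
    && !((sl.get? key == some succ) || (sl.get? succ == some key))

-- Source B's 'pairs' comprehension
def pvPairs (sd : PySem.Dict String (List String)) (sl : PySem.Dict String String) :
    List (String × String) :=
  sd.items.flatMap (fun kv =>
    (kv.2.filter (fun s => pvHitB sd sl kv.1 s)).map (fun s => (kv.1, s)))

-- Source B's inner 'for k2, s2 in pairs[i+1:]' loop over one cluster
def pvAbsorb (S : List String) (ps : List (String × String)) : List String :=
  ps.foldl (fun S p => if S.contains p.1 then PySem.Set.add S p.2 else S) S

-- Source B's 'for i, (k, s) in enumerate(pairs)' loop: pairs[i+1:] is the tail after i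
def pvClusters : List (String × String) → List (List String)
  | [] => []
  | (k, s) :: ps => pvAbsorb (PySem.Set.ofList [k, s]) ps :: pvClusters ps

def get_parallel_events_plus_alt (successions : List (String × List String)) (traces : List String) (short_loops : List (String × String)) : List (List String) :=
  let sd : PySem.Dict String (List String) := PySem.Dict.ofList successions
  let sl : PySem.Dict String String := PySem.Dict.ofList short_loops
  let clusters := pvClusters (pvPairs sd sl)
  -- dedup: seen is a set of frozensets; a frozenset is modelled exactly by the
  -- sorted list of the (distinct) elements: frozensets are equal iff these are
  (clusters.foldl (fun (acc : List (List String) × List (List String)) p =>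
      let f := PySem.List.sorted p (fun x => x) false
      if acc.2.contains f then acc else (acc.1 ++ [p], acc.2 ++ [f]))
    ([], [])).1

-- ===== PRECONDITION & SPEC =====
def Spec_get_parallel_events_plus (successions : List (String × List String)) (traces : List String) (short_loops : List (String × String)) (out : List (List String)) : Prop := out = get_parallel_events_plus_alt successions traces short_loops
instance (successions : List (String × List String)) (traces : List String) (short_loops : List (String × String)) (out : List (List String)) : Decidable (Spec_get_parallel_events_plus successions traces short_loops out) := by unfold Spec_get_parallel_events_plus; infer_instance

-- ===== CLAIM (what is proved, stated in full; the proofs are below) =====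
def Claim_equal_get_parallel_events_plus : Prop := ∀ (successions : List (String × List String)) (traces : List String) (short_loops : List (String × String)), Dom_get_parallel_events_plus successions traces short_loops → Spec_get_parallel_events_plus successions traces short_loops (get_parallel_events_plus successions traces short_loops)

-- ===== LEMMAS AND PROOFS =====

lemma pvHit_eq (sd : PySem.Dict String (List String)) (sl : PySem.Dict String String)
    (k s : String) : pvHitA sd sl k s = pvHitB sd sl k s := by
  have h : ((sl.contains k && (((sl.get? k).getD "") == s)) || (sl.contains s && (((sl.get? s).getD "") == k)))
      = ((sl.get? k == some s) || (sl.get? s == some k)) := by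
    rw [PySem.Dict.contains_eq_isSome_get? sl k, PySem.Dict.contains_eq_isSome_get? sl s]
    cases sl.get? k <;> cases sl.get? s <;> simp
  unfold pvHitA pvHitB pvAreShortLoop
  dsimp only
  rw [h, Bool.and_assoc, PySem.Dict.contains_eq_isSome_get? sd s]
  cases sd.get? s <;> simp

-- A's double loop is a fold of pvStepA over the qualifying pairs (inner loop)
lemma pvInner_eq (sd : PySem.Dict String (List String)) (sl : PySem.Dict String String)
    (k : String) (vals : List String) :
    ∀ init : List (List String),
      vals.foldl (fun pe succ => if pvHitA sd sl k succ then pvStepA pe k succ else pe) init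
        = ((vals.filter (fun s => pvHitB sd sl k s)).map (fun s => (k, s))).foldl
            (fun pe p => pvStepA pe p.1 p.2) init := by
  induction vals with
  | nil => intro init; rfl
  | cons v vals ih =>
    intro init
    rw [List.foldl_cons]
    by_cases h : pvHitB sd sl k v = true
    · rw [if_pos (by rw [pvHit_eq]; exact h), List.filter_cons_of_pos h, List.map_cons,
        List.foldl_cons]
      exact ih _
    · rw [if_neg (by rw [pvHit_eq]; exact h), List.filter_cons_of_neg h]
      exact ih init

-- A's double loop is a fold of pvStepA over B's pairs list
lemma pvFold_pairs (sd : PySem.Dict String (List String)) (sl : PySem.Dict String String)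
    (items : List (String × List String)) :
    ∀ init : List (List String),
      items.foldl (fun pe kv => kv.2.foldl (fun pe succ =>
          if pvHitA sd sl kv.1 succ then pvStepA pe kv.1 succ else pe) pe) init
        = (items.flatMap (fun kv =>
            (kv.2.filter (fun s => pvHitB sd sl kv.1 s)).map (fun s => (kv.1, s)))).foldl
            (fun pe p => pvStepA pe p.1 p.2) init := by
  induction items with
  | nil => intro init; rfl
  | cons kv items ih =>
    intro init
    rw [List.foldl_cons, List.flatMap_cons, List.foldl_append, pvInner_eq]
    exact ih _

-- the fold of pvStepA from an arbitrary prefix: existing sets absorb, each pair seeds a cluster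
lemma pvFold_stepA_char (ps : List (String × String)) :
    ∀ sets : List (List String),
      ps.foldl (fun pe p => pvStepA pe p.1 p.2) sets
        = sets.map (fun S => pvAbsorb S ps) ++ pvClusters ps := by
  induction ps with
  | nil =>
    intro sets
    simp [pvClusters, pvAbsorb]
  | cons p ps ih =>
    intro sets
    obtain ⟨k, s⟩ := p
    rw [List.foldl_cons, ih]
    show (pvStepA sets k s).map (fun S => pvAbsorb S ps) ++ pvClusters ps
      = sets.map (fun S => pvAbsorb S ((k, s) :: ps)) ++ pvClusters ((k, s) :: ps)
    rw [pvStepA, List.map_append, List.map_map, List.append_assoc]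
    rfl

-- all clusters are duplicate-free
lemma pvAbsorb_nodup (ps : List (String × String)) :
    ∀ S : List String, S.Nodup → (pvAbsorb S ps).Nodup := by
  induction ps with
  | nil => intro S h; exact h
  | cons p ps ih =>
    intro S h
    rw [pvAbsorb, List.foldl_cons]
    by_cases hc : S.contains p.1 = true
    · rw [if_pos hc]; exact ih _ (PySem.Set.nodup_add S p.2 h)
    · rw [if_neg hc]; exact ih _ h

lemma pvClusters_nodup (ps : List (String × String)) :
    ∀ S ∈ pvClusters ps, S.Nodup := by
  induction ps with
  | nil => intro S hS; cases hS
  | cons p ps ih =>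
    intro S hS
    obtain ⟨k, s⟩ := p
    rcases List.mem_cons.mp hS with hS | hS
    · rw [hS]; exact pvAbsorb_nodup ps _ (PySem.Set.nodup_ofList _)
    · exact ih S hS

-- A's list-membership dedup equals B's seen-set-of-frozensets dedup on nodup sets
lemma pvDedup_eq (pes : List (List String)) (hnd : ∀ S ∈ pes, S.Nodup) :
    pes.foldl (fun filtered p =>
        if filtered.any (fun q => PySem.Set.equal q p) then filtered else filtered ++ [p]) []
      = (pes.foldl (fun (acc : List (List String) × List (List String)) p =>
          let f := PySem.List.sorted p (fun x => x) false
          if acc.2.contains f then acc else (acc.1 ++ [p], acc.2 ++ [f])) ([], [])).1 := by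
  have haux : ∀ (pes flt : List (List String)), (∀ S ∈ pes, S.Nodup) → (∀ S ∈ flt, S.Nodup) →
      pes.foldl (fun filtered p =>
          if filtered.any (fun q => PySem.Set.equal q p) then filtered else filtered ++ [p]) flt
        = (pes.foldl (fun (acc : List (List String) × List (List String)) p =>
            let f := PySem.List.sorted p (fun x => x) false
            if acc.2.contains f then acc else (acc.1 ++ [p], acc.2 ++ [f]))
          (flt, flt.map (fun q => PySem.List.sorted q (fun x => x) false))).1 := by
    intro pes
    induction pes with
    | nil => intro flt _ _; rfl
    | cons p pes ih =>
      intro flt hp hf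
      simp only [List.foldl_cons]
      have hpt : ∀ q ∈ flt, (PySem.Set.equal q p = true
          ↔ PySem.List.sorted q (fun x => x) false = PySem.List.sorted p (fun x => x) false) := by
        intro q hq
        have hqnd := hf q hq
        have hpnd := hp p (List.mem_cons_self ..)
        rw [PySem.List.sorted_id_eq_sorted_id_iff_perm]
        constructor
        · intro h
          have hmm : (∀ x ∈ q, x ∈ p) ∧ (∀ x ∈ p, x ∈ q) := by
            simpa [PySem.Set.equal, PySem.Set.issubset, PySem.Set.contains,
              List.all_eq_true, List.contains_iff_mem] using h
          exact (List.perm_ext_iff_of_nodup hqnd hpnd).mpr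
            (fun x => ⟨fun hx => hmm.1 x hx, fun hx => hmm.2 x hx⟩)
        · intro h
          have hmm := (List.perm_ext_iff_of_nodup hqnd hpnd).mp h
          simp only [PySem.Set.equal, PySem.Set.issubset, PySem.Set.contains,
            Bool.and_eq_true, List.all_eq_true, List.contains_iff_mem]
          exact ⟨fun x hx => by simpa using (hmm x).mp hx, fun x hx => by simpa using (hmm x).mpr hx⟩
      have hguard : (flt.any (fun q => PySem.Set.equal q p))
          = ((flt.map (fun q => PySem.List.sorted q (fun x => x) false)).contains
              (PySem.List.sorted p (fun x => x) false)) := by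
        rw [Bool.eq_iff_iff, List.any_eq_true]
        rw [show ((flt.map (fun q => PySem.List.sorted q (fun x => x) false)).contains
              (PySem.List.sorted p (fun x => x) false) = true)
            ↔ PySem.List.sorted p (fun x => x) false
                ∈ flt.map (fun q => PySem.List.sorted q (fun x => x) false) from List.contains_iff_mem]
        rw [List.mem_map]
        constructor
        · rintro ⟨q, hq, he⟩
          exact ⟨q, hq, (hpt q hq).mp he⟩
        · rintro ⟨q, hq, he⟩
          exact ⟨q, hq, (hpt q hq).mpr he⟩
      show _ = (List.foldl _ (if (flt.map (fun q => PySem.List.sorted q (fun x => x) false)).contains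
          (PySem.List.sorted p (fun x => x) false) = true
        then _ else (flt ++ [p], flt.map (fun q => PySem.List.sorted q (fun x => x) false)
            ++ [PySem.List.sorted p (fun x => x) false])) pes).1
      by_cases hg : flt.any (fun q => PySem.Set.equal q p) = true
      · rw [if_pos hg, if_pos (by rw [← hguard]; exact hg)]
        exact ih flt (fun S hS => hp S (List.mem_cons_of_mem _ hS)) hf
      · rw [if_neg hg, if_neg (by rw [← hguard]; exact hg)]
        have hrec := ih (flt ++ [p]) (fun S hS => hp S (List.mem_cons_of_mem _ hS))
          (by
            intro S hS
            rcases List.mem_append.mp hS with hS | hS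
            · exact hf S hS
            · rw [List.mem_singleton.mp hS]
              exact hp p (List.mem_cons_self ..))
        rw [List.map_append] at hrec
        exact hrec
  exact haux pes [] hnd (fun S hS => absurd hS List.not_mem_nil)

-- ===== VERDICT (by name: the statement is the Claim_ definition above) =====
theorem get_parallel_events_plus_spec : Claim_equal_get_parallel_events_plus := by
  intro successions traces short_loops _
  unfold Spec_get_parallel_events_plus get_parallel_events_plus get_parallel_events_plus_alt
  dsimp only
  rw [pvFold_pairs, pvFold_stepA_char, List.map_nil, List.nil_append]
  exact pvDedup_eq _ (pvClusters_nodup _)
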